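-- pv_equiv track=rewrite | github.com/Linnnnberg/investByYourself | src/etl/transformers/financial_transformer.py | _extract_financial_statements
-- ===== SOURCE A (Python) =====
-- from typing import Any, Dict, List, Optional, Union
--
-- def _extract_financial_statements(data: Dict[str, Any]) -> Dict[str, Any]:
--     """Extract financial statement data."""
--     statements = {}
--
--     # Income statement - check both original and transformed field names
--     revenue_fields = ["revenue", "totalRevenue", "Revenue"]
--     cost_fields = ["cost_of_revenue", "costOfRevenue", "Cost of Revenue"]
--     gross_profit_fields = ["gross_profit", "grossProfit", "Gross Profit"]
--     operating_income_fields = [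
--         "operating_income",
--         "operatingIncome",
--         "Operating Income",
--     ]
--     net_income_fields = ["net_income", "netIncome", "Net Income"]
--
--     if any(field in data for field in revenue_fields):
--         statements["income_statement"] = {
--             "revenue": data.get("revenue")
--             or data.get("totalRevenue")
--             or data.get("Revenue"),
--             "cost_of_revenue": data.get("cost_of_revenue")
--             or data.get("costOfRevenue")
--             or data.get("Cost of Revenue"),
--             "gross_profit": data.get("gross_profit")
--             or data.get("grossProfit")
--             or data.get("Gross Profit"),
--             "operating_income": data.get("operating_income")
--             or data.get("operatingIncome")
--             or data.get("Operating Income"),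
--             "net_income": data.get("net_income")
--             or data.get("netIncome")
--             or data.get("Net Income"),
--         }
--
--     # Balance sheet - check both original and transformed field names
--     assets_fields = ["total_assets", "totalAssets", "Total Assets"]
--     current_assets_fields = ["current_assets", "currentAssets", "Current Assets"]
--     liabilities_fields = [
--         "total_liabilities",
--         "totalLiabilities",
--         "Total Liabilities",
--     ]
--     current_liabilities_fields = [
--         "current_liabilities",
--         "currentLiabilities",
--         "Current Liabilities",
--     ]
--     equity_fields = ["total_equity", "totalEquity", "Total Equity"]
--     debt_fields = [
--         "total_debt",
--         "totalDebt",
--         "Total Debt",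
--         "longTermDebt",
--         "long_term_debt",
--     ]
--
--     if any(field in data for field in assets_fields):
--         statements["balance_sheet"] = {
--             "total_assets": data.get("total_assets")
--             or data.get("totalAssets")
--             or data.get("Total Assets"),
--             "current_assets": data.get("current_assets")
--             or data.get("currentAssets")
--             or data.get("Current Assets"),
--             "total_liabilities": data.get("total_liabilities")
--             or data.get("totalLiabilities")
--             or data.get("Total Liabilities"),
--             "current_liabilities": data.get("current_liabilities")
--             or data.get("currentLiabilities")
--             or data.get("Current Liabilities"),
--             "total_equity": data.get("total_equity")
--             or data.get("totalEquity")
--             or data.get("Total Equity"),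
--             "total_debt": data.get("total_debt")
--             or data.get("totalDebt")
--             or data.get("Total Debt")
--             or data.get("longTermDebt")
--             or data.get("long_term_debt"),
--         }
--
--     return statements
-- ===== SOURCE B (Python) =====
-- from typing import Any, Dict, List, Optional, Union
--
-- # Inverted-index single-pass re-implementation: instead of doing a dict lookup per
-- # candidate field, walk the input ONCE, routing each recognised key through a reverse
-- # index field -> (section, output_slot, priority) into a candidate table, then assemble
-- # the result from that table (first truthy priority wins, last priority's value as
-- # fallback; a section is emitted iff any of its lead slot's source fields was seen,
-- # which are exactly A's guard fields).
--
-- _LAYOUT = [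
--     ("income_statement", [
--         ("revenue", ["revenue", "totalRevenue", "Revenue"]),
--         ("cost_of_revenue", ["cost_of_revenue", "costOfRevenue", "Cost of Revenue"]),
--         ("gross_profit", ["gross_profit", "grossProfit", "Gross Profit"]),
--         ("operating_income", ["operating_income", "operatingIncome", "Operating Income"]),
--         ("net_income", ["net_income", "netIncome", "Net Income"]),
--     ]),
--     ("balance_sheet", [
--         ("total_assets", ["total_assets", "totalAssets", "Total Assets"]),
--         ("current_assets", ["current_assets", "currentAssets", "Current Assets"]),
--         ("total_liabilities", ["total_liabilities", "totalLiabilities", "Total Liabilities"]),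
--         ("current_liabilities", ["current_liabilities", "currentLiabilities", "Current Liabilities"]),
--         ("total_equity", ["total_equity", "totalEquity", "Total Equity"]),
--         ("total_debt", ["total_debt", "totalDebt", "Total Debt", "longTermDebt", "long_term_debt"]),
--     ]),
-- ]
--
-- # reverse index: source field name -> (section, output slot, priority)
-- _FIELD_SLOT = {
--     field: (sec, slot, pr)
--     for sec, slots in _LAYOUT
--     for slot, fields in slots
--     for pr, field in enumerate(fields)
-- }
--
-- # arity of each slot (number of candidate fields)
-- _ARITY = {(sec, slot): len(fields) for sec, slots in _LAYOUT for slot, fields in slots}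
--
--
-- def _extract_financial_statements(data: Dict[str, Any]) -> Dict[str, Any]:
--     """Extract financial statement data."""
--     # pass 1: route every recognised input key into the candidate table
--     cand = {}
--     for key, value in data.items():
--         info = _FIELD_SLOT.get(key)
--         if info is not None:
--             cand.setdefault(info, value)
--     # pass 2: assemble the output from the candidate table alone
--     statements = {}
--     for sec, slots in _LAYOUT:
--         lead, lead_fields = slots[0]
--         if any((sec, lead, pr) in cand for pr in range(len(lead_fields))):
--             section = {}
--             for slot, fields in slots:
--                 chosen = None
--                 for pr in range(_ARITY[(sec, slot)]):
--                     chosen = cand.get((sec, slot, pr))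
--                     if chosen:
--                         break
--                 section[slot] = chosen
--             statements[sec] = section
--     return statements
-- ===== Notes on version B (the rewrite author's own statement) =====
-- stated objective: alternative
-- what changed: Inverted the traversal: instead of A's per-candidate-field dict lookups in two hand-written guarded 'or'-chain blocks, B walks the input once, routing each recognised key through a reverse index field->(section,slot,priority) into a candidate table, then assembles the result purely from that table (first truthy priority, last priority as fallback; a section is emitted iff any lead-slot coordinate was seen).
import Mathlib
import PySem

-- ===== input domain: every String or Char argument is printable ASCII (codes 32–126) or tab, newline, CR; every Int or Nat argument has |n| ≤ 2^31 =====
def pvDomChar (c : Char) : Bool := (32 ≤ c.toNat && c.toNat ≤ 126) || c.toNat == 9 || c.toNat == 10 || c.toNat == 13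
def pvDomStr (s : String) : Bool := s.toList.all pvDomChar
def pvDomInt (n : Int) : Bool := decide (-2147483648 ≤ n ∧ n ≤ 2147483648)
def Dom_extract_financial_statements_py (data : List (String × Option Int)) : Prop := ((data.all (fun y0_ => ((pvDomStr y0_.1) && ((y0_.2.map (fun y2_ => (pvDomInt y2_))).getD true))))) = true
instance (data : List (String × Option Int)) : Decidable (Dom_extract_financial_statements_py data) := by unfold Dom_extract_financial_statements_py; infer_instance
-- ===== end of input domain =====

-- B replaces A's per-field dict lookups (two hand-written guarded blocks of 'or'-chains) by a
-- single pass over the input routed through a reverse index field -> (section, slot, priority)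
-- into a candidate table, from which the result is assembled; objective: alternative
-- decomposition (inverted traversal), same cost, return value proved equal.


-- ===== PORT A =====
-- shared Python primitives on the str -> Optional[int] dict: data.get(k) (first binding,
-- None if absent), 'k in data', and Python truthiness of an Optional[int] (None, 0 falsy)
def pvGet (data : List (String × Option Int)) (k : String) : Option Int :=
  (data.find? (fun p => p.1 == k)).bind (fun p => p.2)

def pvIn (data : List (String × Option Int)) (k : String) : Bool :=
  data.any (fun p => p.1 == k)

def pvTruthy : Option Int → Bool
  | none => false
  | some n => n != 0

-- Python's 'a or b': a if truthy else b
def pvOrA (a b : Option Int) : Option Int := if pvTruthy a then a else b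

def extract_financial_statements_py (data : List (String × Option Int)) : List (String × List (String × Option Int)) :=
  let statements : List (String × List (String × Option Int)) := []
  let statements :=
    if ["revenue", "totalRevenue", "Revenue"].any (fun f => pvIn data f) then
      statements ++ [("income_statement",
        [("revenue", pvOrA (pvGet data "revenue") (pvOrA (pvGet data "totalRevenue") (pvGet data "Revenue"))),
         ("cost_of_revenue", pvOrA (pvGet data "cost_of_revenue") (pvOrA (pvGet data "costOfRevenue") (pvGet data "Cost of Revenue"))),
         ("gross_profit", pvOrA (pvGet data "gross_profit") (pvOrA (pvGet data "grossProfit") (pvGet data "Gross Profit"))),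
         ("operating_income", pvOrA (pvGet data "operating_income") (pvOrA (pvGet data "operatingIncome") (pvGet data "Operating Income"))),
         ("net_income", pvOrA (pvGet data "net_income") (pvOrA (pvGet data "netIncome") (pvGet data "Net Income")))])]
    else statements
  let statements :=
    if ["total_assets", "totalAssets", "Total Assets"].any (fun f => pvIn data f) then
      statements ++ [("balance_sheet",
        [("total_assets", pvOrA (pvGet data "total_assets") (pvOrA (pvGet data "totalAssets") (pvGet data "Total Assets"))),
         ("current_assets", pvOrA (pvGet data "current_assets") (pvOrA (pvGet data "currentAssets") (pvGet data "Current Assets"))),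
         ("total_liabilities", pvOrA (pvGet data "total_liabilities") (pvOrA (pvGet data "totalLiabilities") (pvGet data "Total Liabilities"))),
         ("current_liabilities", pvOrA (pvGet data "current_liabilities") (pvOrA (pvGet data "currentLiabilities") (pvGet data "Current Liabilities"))),
         ("total_equity", pvOrA (pvGet data "total_equity") (pvOrA (pvGet data "totalEquity") (pvGet data "Total Equity"))),
         ("total_debt", pvOrA (pvGet data "total_debt") (pvOrA (pvGet data "totalDebt") (pvOrA (pvGet data "Total Debt") (pvOrA (pvGet data "longTermDebt") (pvGet data "long_term_debt")))))])]
    else statements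
  statements

-- ===== PORT B =====
-- the reverse index _FIELD_SLOT of Source B: source field -> (section, output slot, priority)
def pvFieldSlot : PySem.Dict String (String × String × Int) :=
  PySem.Dict.mk
    [("revenue", ("income_statement", "revenue", (0 : Int))),
     ("totalRevenue", ("income_statement", "revenue", (1 : Int))),
     ("Revenue", ("income_statement", "revenue", (2 : Int))),
     ("cost_of_revenue", ("income_statement", "cost_of_revenue", (0 : Int))),
     ("costOfRevenue", ("income_statement", "cost_of_revenue", (1 : Int))),
     ("Cost of Revenue", ("income_statement", "cost_of_revenue", (2 : Int))),
     ("gross_profit", ("income_statement", "gross_profit", (0 : Int))),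
     ("grossProfit", ("income_statement", "gross_profit", (1 : Int))),
     ("Gross Profit", ("income_statement", "gross_profit", (2 : Int))),
     ("operating_income", ("income_statement", "operating_income", (0 : Int))),
     ("operatingIncome", ("income_statement", "operating_income", (1 : Int))),
     ("Operating Income", ("income_statement", "operating_income", (2 : Int))),
     ("net_income", ("income_statement", "net_income", (0 : Int))),
     ("netIncome", ("income_statement", "net_income", (1 : Int))),
     ("Net Income", ("income_statement", "net_income", (2 : Int))),
     ("total_assets", ("balance_sheet", "total_assets", (0 : Int))),
     ("totalAssets", ("balance_sheet", "total_assets", (1 : Int))),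
     ("Total Assets", ("balance_sheet", "total_assets", (2 : Int))),
     ("current_assets", ("balance_sheet", "current_assets", (0 : Int))),
     ("currentAssets", ("balance_sheet", "current_assets", (1 : Int))),
     ("Current Assets", ("balance_sheet", "current_assets", (2 : Int))),
     ("total_liabilities", ("balance_sheet", "total_liabilities", (0 : Int))),
     ("totalLiabilities", ("balance_sheet", "total_liabilities", (1 : Int))),
     ("Total Liabilities", ("balance_sheet", "total_liabilities", (2 : Int))),
     ("current_liabilities", ("balance_sheet", "current_liabilities", (0 : Int))),
     ("currentLiabilities", ("balance_sheet", "current_liabilities", (1 : Int))),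
     ("Current Liabilities", ("balance_sheet", "current_liabilities", (2 : Int))),
     ("total_equity", ("balance_sheet", "total_equity", (0 : Int))),
     ("totalEquity", ("balance_sheet", "total_equity", (1 : Int))),
     ("Total Equity", ("balance_sheet", "total_equity", (2 : Int))),
     ("total_debt", ("balance_sheet", "total_debt", (0 : Int))),
     ("totalDebt", ("balance_sheet", "total_debt", (1 : Int))),
     ("Total Debt", ("balance_sheet", "total_debt", (2 : Int))),
     ("longTermDebt", ("balance_sheet", "total_debt", (3 : Int))),
     ("long_term_debt", ("balance_sheet", "total_debt", (4 : Int)))]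

-- the table _LAYOUT of Source B (slot arities inlined: _ARITY[(sec, slot)] = len(fields))
def pvLayout : List (String × List (String × Int)) :=
  [("income_statement", [("revenue", (3 : Int)), ("cost_of_revenue", (3 : Int)), ("gross_profit", (3 : Int)), ("operating_income", (3 : Int)), ("net_income", (3 : Int))]),
   ("balance_sheet", [("total_assets", (3 : Int)), ("current_assets", (3 : Int)), ("total_liabilities", (3 : Int)), ("current_liabilities", (3 : Int)), ("total_equity", (3 : Int)), ("total_debt", (5 : Int))])]

-- pass-1 body: 'info = _FIELD_SLOT.get(key); if info is not None: cand.setdefault(info, value)'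
def pvStep (cand : PySem.Dict (String × String × Int) (Option Int)) (kv : String × Option Int) :
    PySem.Dict (String × String × Int) (Option Int) :=
  match PySem.Dict.get? pvFieldSlot kv.1 with
  | some info => cand.setdefault info kv.2
  | none => cand

-- the inner loop 'chosen = None; for pr in prs: chosen = cand.get((sec, slot, pr)); if chosen: break'
def pvScan (cand : PySem.Dict (String × String × Int) (Option Int)) (sec slot : String) :
    Option Int → List Int → Option Int
  | ch, [] => ch
  | _, pr :: rest =>
    let ch := cand.getD (sec, slot, pr) none
    if pvTruthy ch then ch else pvScan cand sec slot ch rest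

def extract_financial_statements_py_alt (data : List (String × Option Int)) : List (String × List (String × Option Int)) :=
  let cand := data.foldl pvStep PySem.Dict.empty
  pvLayout.foldl (fun statements sec =>
    let lead := sec.2.headD ("", 0)
    if (PySem.List.pyRange 0 lead.2 1).any (fun pr => cand.contains (sec.1, lead.1, pr)) then
      statements ++ [(sec.1,
        sec.2.foldl (fun sd slot =>
          sd ++ [(slot.1, pvScan cand sec.1 slot.1 none (PySem.List.pyRange 0 slot.2 1))]) [])]
    else statements) []

-- ===== PRECONDITION & SPEC =====
def Spec_extract_financial_statements_py (data : List (String × Option Int)) (out : List (String × List (String × Option Int))) : Prop := out = extract_financial_statements_py_alt data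
instance (data : List (String × Option Int)) (out : List (String × List (String × Option Int))) : Decidable (Spec_extract_financial_statements_py data out) := by unfold Spec_extract_financial_statements_py; infer_instance

-- ===== CLAIM (what is proved, stated in full; the proofs are below) =====
def Claim_equal_extract_financial_statements_py : Prop := ∀ (data : List (String × Option Int)), Dom_extract_financial_statements_py data → Spec_extract_financial_statements_py data (extract_financial_statements_py data)

-- ===== LEMMAS AND PROOFS =====
-- pass-1 invariant: the candidate table's entry at info is the FIRST value of a data pair
-- whose key the reverse index maps to info (setdefault = first occurrence wins)
lemma pvFold_get? (data : List (String × Option Int))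
    (c : PySem.Dict (String × String × Int) (Option Int)) (info : String × String × Int) :
    (data.foldl pvStep c).get? info =
      (match c.get? info with
       | some v => some v
       | none => (data.find? (fun p => PySem.Dict.get? pvFieldSlot p.1 == some info)).map (·.2)) := by
  induction data generalizing c with
  | nil => cases h : c.get? info <;> simp [h]
  | cons kv t ih =>
    simp only [List.foldl_cons, ih, List.find?_cons]
    cases hfs : PySem.Dict.get? pvFieldSlot kv.1 with
    | none => simp [pvStep, hfs]
    | some i =>
      by_cases hi : i = info
      · subst hi
        simp only [pvStep, hfs, PySem.Dict.get?_setdefault_self, beq_self_eq_true]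
        cases h : c.get? i <;> simp

      · have hne : info ≠ i := fun h => hi h.symm
        simp only [pvStep, hfs, PySem.Dict.get?_setdefault_of_ne c kv.2 hne]
        have hb : (some i == some info) = false := by simp [hi]
        simp [hb]

-- a value of the reverse index determines its key (the index is injective on values)
lemma pvKeyChar (f : String) (info : String × String × Int)
    (h1 : PySem.Dict.get? pvFieldSlot f = some info)
    (h2 : ∀ p ∈ pvFieldSlot.items, p.2 = info → p.1 = f) :
    ∀ k, (PySem.Dict.get? pvFieldSlot k == some info) = (k == f) := by
  intro k
  by_cases hk : k = f
  · subst hk; simp [h1]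
  · cases hg : PySem.Dict.get? pvFieldSlot k with
    | none => simp [hk]
    | some i =>
      by_cases hi : i = info
      · subst hi
        exact absurd (h2 _ (PySem.Dict.mem_items_of_get?_eq_some _ hg) rfl) hk
      · simp [hi, hk]

lemma pvIn_eq_find (data : List (String × Option Int)) (f : String) :
    pvIn data f = (data.find? (fun p => p.1 == f)).isSome := by
  induction data with
  | nil => rfl
  | cons kv t ih =>
    simp only [pvIn, List.any_cons, List.find?_cons] at *
    cases hp : (kv.1 == f) <;> simp [ih]


-- candidate-table lookup at a coordinate = data.get of the field mapped there
lemma pvCandGetD (data : List (String × Option Int)) (f : String) (info : String × String × Int)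
    (h1 : PySem.Dict.get? pvFieldSlot f = some info)
    (h2 : ∀ p ∈ pvFieldSlot.items, p.2 = info → p.1 = f) :
    (data.foldl pvStep PySem.Dict.empty).getD info none = pvGet data f := by
  have hpred : (fun p : String × Option Int => PySem.Dict.get? pvFieldSlot p.1 == some info)
      = (fun p : String × Option Int => p.1 == f) := by
    funext p; exact pvKeyChar f info h1 h2 p.1
  rw [PySem.Dict.getD_eq_get?_getD, pvFold_get? data _ info, PySem.Dict.get?_empty, hpred]
  unfold pvGet
  cases data.find? (fun p : String × Option Int => p.1 == f) <;> rfl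

-- candidate-table membership at a coordinate = 'field in data'
lemma pvCandContains (data : List (String × Option Int)) (f : String) (info : String × String × Int)
    (h1 : PySem.Dict.get? pvFieldSlot f = some info)
    (h2 : ∀ p ∈ pvFieldSlot.items, p.2 = info → p.1 = f) :
    (data.foldl pvStep PySem.Dict.empty).contains info = pvIn data f := by
  have hpred : (fun p : String × Option Int => PySem.Dict.get? pvFieldSlot p.1 == some info)
      = (fun p : String × Option Int => p.1 == f) := by
    funext p; exact pvKeyChar f info h1 h2 p.1
  rw [PySem.Dict.contains_eq_isSome_get?, pvFold_get? data _ info, PySem.Dict.get?_empty, hpred,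
    pvIn_eq_find]
  cases data.find? (fun p : String × Option Int => p.1 == f) <;> rfl

-- the break-on-truthy scan over 3 (resp. 5) priorities is exactly A's 'or'-chain
lemma pvScan_three (c : PySem.Dict (String × String × Int) (Option Int)) (s t : String) (a b d : Int) :
    pvScan c s t none [a, b, d] =
      pvOrA (c.getD (s, t, a) none) (pvOrA (c.getD (s, t, b) none) (c.getD (s, t, d) none)) := by
  simp only [pvScan, pvOrA]
  split_ifs <;> rfl

lemma pvScan_five (c : PySem.Dict (String × String × Int) (Option Int)) (s t : String) (a b d e f : Int) :
    pvScan c s t none [a, b, d, e, f] =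
      pvOrA (c.getD (s, t, a) none) (pvOrA (c.getD (s, t, b) none) (pvOrA (c.getD (s, t, d) none)
        (pvOrA (c.getD (s, t, e) none) (c.getD (s, t, f) none)))) := by
  simp only [pvScan, pvOrA]
  split_ifs <;> rfl

lemma pvRange3 : PySem.List.pyRange 0 3 1 = [0, 1, 2] := by decide
lemma pvRange5 : PySem.List.pyRange 0 5 1 = [0, 1, 2, 3, 4] := by decide

-- per-coordinate instances of the two lemmas above
lemma pvCG_0 (data : List (String × Option Int)) :
    (data.foldl pvStep PySem.Dict.empty).getD ("income_statement", "revenue", (0 : Int)) none = pvGet data "revenue" :=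
  pvCandGetD data "revenue" _ (by decide) (by decide)

lemma pvCG_1 (data : List (String × Option Int)) :
    (data.foldl pvStep PySem.Dict.empty).getD ("income_statement", "revenue", (1 : Int)) none = pvGet data "totalRevenue" :=
  pvCandGetD data "totalRevenue" _ (by decide) (by decide)

lemma pvCG_2 (data : List (String × Option Int)) :
    (data.foldl pvStep PySem.Dict.empty).getD ("income_statement", "revenue", (2 : Int)) none = pvGet data "Revenue" :=
  pvCandGetD data "Revenue" _ (by decide) (by decide)

lemma pvCG_3 (data : List (String × Option Int)) :
    (data.foldl pvStep PySem.Dict.empty).getD ("income_statement", "cost_of_revenue", (0 : Int)) none = pvGet data "cost_of_revenue" :=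
  pvCandGetD data "cost_of_revenue" _ (by decide) (by decide)

lemma pvCG_4 (data : List (String × Option Int)) :
    (data.foldl pvStep PySem.Dict.empty).getD ("income_statement", "cost_of_revenue", (1 : Int)) none = pvGet data "costOfRevenue" :=
  pvCandGetD data "costOfRevenue" _ (by decide) (by decide)

lemma pvCG_5 (data : List (String × Option Int)) :
    (data.foldl pvStep PySem.Dict.empty).getD ("income_statement", "cost_of_revenue", (2 : Int)) none = pvGet data "Cost of Revenue" :=
  pvCandGetD data "Cost of Revenue" _ (by decide) (by decide)

lemma pvCG_6 (data : List (String × Option Int)) :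
    (data.foldl pvStep PySem.Dict.empty).getD ("income_statement", "gross_profit", (0 : Int)) none = pvGet data "gross_profit" :=
  pvCandGetD data "gross_profit" _ (by decide) (by decide)

lemma pvCG_7 (data : List (String × Option Int)) :
    (data.foldl pvStep PySem.Dict.empty).getD ("income_statement", "gross_profit", (1 : Int)) none = pvGet data "grossProfit" :=
  pvCandGetD data "grossProfit" _ (by decide) (by decide)

lemma pvCG_8 (data : List (String × Option Int)) :
    (data.foldl pvStep PySem.Dict.empty).getD ("income_statement", "gross_profit", (2 : Int)) none = pvGet data "Gross Profit" :=
  pvCandGetD data "Gross Profit" _ (by decide) (by decide)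

lemma pvCG_9 (data : List (String × Option Int)) :
    (data.foldl pvStep PySem.Dict.empty).getD ("income_statement", "operating_income", (0 : Int)) none = pvGet data "operating_income" :=
  pvCandGetD data "operating_income" _ (by decide) (by decide)

lemma pvCG_10 (data : List (String × Option Int)) :
    (data.foldl pvStep PySem.Dict.empty).getD ("income_statement", "operating_income", (1 : Int)) none = pvGet data "operatingIncome" :=
  pvCandGetD data "operatingIncome" _ (by decide) (by decide)

lemma pvCG_11 (data : List (String × Option Int)) :
    (data.foldl pvStep PySem.Dict.empty).getD ("income_statement", "operating_income", (2 : Int)) none = pvGet data "Operating Income" :=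
  pvCandGetD data "Operating Income" _ (by decide) (by decide)

lemma pvCG_12 (data : List (String × Option Int)) :
    (data.foldl pvStep PySem.Dict.empty).getD ("income_statement", "net_income", (0 : Int)) none = pvGet data "net_income" :=
  pvCandGetD data "net_income" _ (by decide) (by decide)

lemma pvCG_13 (data : List (String × Option Int)) :
    (data.foldl pvStep PySem.Dict.empty).getD ("income_statement", "net_income", (1 : Int)) none = pvGet data "netIncome" :=
  pvCandGetD data "netIncome" _ (by decide) (by decide)

lemma pvCG_14 (data : List (String × Option Int)) :
    (data.foldl pvStep PySem.Dict.empty).getD ("income_statement", "net_income", (2 : Int)) none = pvGet data "Net Income" :=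
  pvCandGetD data "Net Income" _ (by decide) (by decide)

lemma pvCG_15 (data : List (String × Option Int)) :
    (data.foldl pvStep PySem.Dict.empty).getD ("balance_sheet", "total_assets", (0 : Int)) none = pvGet data "total_assets" :=
  pvCandGetD data "total_assets" _ (by decide) (by decide)

lemma pvCG_16 (data : List (String × Option Int)) :
    (data.foldl pvStep PySem.Dict.empty).getD ("balance_sheet", "total_assets", (1 : Int)) none = pvGet data "totalAssets" :=
  pvCandGetD data "totalAssets" _ (by decide) (by decide)

lemma pvCG_17 (data : List (String × Option Int)) :
    (data.foldl pvStep PySem.Dict.empty).getD ("balance_sheet", "total_assets", (2 : Int)) none = pvGet data "Total Assets" :=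
  pvCandGetD data "Total Assets" _ (by decide) (by decide)

lemma pvCG_18 (data : List (String × Option Int)) :
    (data.foldl pvStep PySem.Dict.empty).getD ("balance_sheet", "current_assets", (0 : Int)) none = pvGet data "current_assets" :=
  pvCandGetD data "current_assets" _ (by decide) (by decide)

lemma pvCG_19 (data : List (String × Option Int)) :
    (data.foldl pvStep PySem.Dict.empty).getD ("balance_sheet", "current_assets", (1 : Int)) none = pvGet data "currentAssets" :=
  pvCandGetD data "currentAssets" _ (by decide) (by decide)

lemma pvCG_20 (data : List (String × Option Int)) :
    (data.foldl pvStep PySem.Dict.empty).getD ("balance_sheet", "current_assets", (2 : Int)) none = pvGet data "Current Assets" :=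
  pvCandGetD data "Current Assets" _ (by decide) (by decide)

lemma pvCG_21 (data : List (String × Option Int)) :
    (data.foldl pvStep PySem.Dict.empty).getD ("balance_sheet", "total_liabilities", (0 : Int)) none = pvGet data "total_liabilities" :=
  pvCandGetD data "total_liabilities" _ (by decide) (by decide)

lemma pvCG_22 (data : List (String × Option Int)) :
    (data.foldl pvStep PySem.Dict.empty).getD ("balance_sheet", "total_liabilities", (1 : Int)) none = pvGet data "totalLiabilities" :=
  pvCandGetD data "totalLiabilities" _ (by decide) (by decide)

lemma pvCG_23 (data : List (String × Option Int)) :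
    (data.foldl pvStep PySem.Dict.empty).getD ("balance_sheet", "total_liabilities", (2 : Int)) none = pvGet data "Total Liabilities" :=
  pvCandGetD data "Total Liabilities" _ (by decide) (by decide)

lemma pvCG_24 (data : List (String × Option Int)) :
    (data.foldl pvStep PySem.Dict.empty).getD ("balance_sheet", "current_liabilities", (0 : Int)) none = pvGet data "current_liabilities" :=
  pvCandGetD data "current_liabilities" _ (by decide) (by decide)

lemma pvCG_25 (data : List (String × Option Int)) :
    (data.foldl pvStep PySem.Dict.empty).getD ("balance_sheet", "current_liabilities", (1 : Int)) none = pvGet data "currentLiabilities" :=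
  pvCandGetD data "currentLiabilities" _ (by decide) (by decide)

lemma pvCG_26 (data : List (String × Option Int)) :
    (data.foldl pvStep PySem.Dict.empty).getD ("balance_sheet", "current_liabilities", (2 : Int)) none = pvGet data "Current Liabilities" :=
  pvCandGetD data "Current Liabilities" _ (by decide) (by decide)

lemma pvCG_27 (data : List (String × Option Int)) :
    (data.foldl pvStep PySem.Dict.empty).getD ("balance_sheet", "total_equity", (0 : Int)) none = pvGet data "total_equity" :=
  pvCandGetD data "total_equity" _ (by decide) (by decide)

lemma pvCG_28 (data : List (String × Option Int)) :
    (data.foldl pvStep PySem.Dict.empty).getD ("balance_sheet", "total_equity", (1 : Int)) none = pvGet data "totalEquity" :=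
  pvCandGetD data "totalEquity" _ (by decide) (by decide)

lemma pvCG_29 (data : List (String × Option Int)) :
    (data.foldl pvStep PySem.Dict.empty).getD ("balance_sheet", "total_equity", (2 : Int)) none = pvGet data "Total Equity" :=
  pvCandGetD data "Total Equity" _ (by decide) (by decide)

lemma pvCG_30 (data : List (String × Option Int)) :
    (data.foldl pvStep PySem.Dict.empty).getD ("balance_sheet", "total_debt", (0 : Int)) none = pvGet data "total_debt" :=
  pvCandGetD data "total_debt" _ (by decide) (by decide)

lemma pvCG_31 (data : List (String × Option Int)) :
    (data.foldl pvStep PySem.Dict.empty).getD ("balance_sheet", "total_debt", (1 : Int)) none = pvGet data "totalDebt" :=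
  pvCandGetD data "totalDebt" _ (by decide) (by decide)

lemma pvCG_32 (data : List (String × Option Int)) :
    (data.foldl pvStep PySem.Dict.empty).getD ("balance_sheet", "total_debt", (2 : Int)) none = pvGet data "Total Debt" :=
  pvCandGetD data "Total Debt" _ (by decide) (by decide)

lemma pvCG_33 (data : List (String × Option Int)) :
    (data.foldl pvStep PySem.Dict.empty).getD ("balance_sheet", "total_debt", (3 : Int)) none = pvGet data "longTermDebt" :=
  pvCandGetD data "longTermDebt" _ (by decide) (by decide)

lemma pvCG_34 (data : List (String × Option Int)) :
    (data.foldl pvStep PySem.Dict.empty).getD ("balance_sheet", "total_debt", (4 : Int)) none = pvGet data "long_term_debt" :=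
  pvCandGetD data "long_term_debt" _ (by decide) (by decide)

lemma pvCC_0 (data : List (String × Option Int)) :
    (data.foldl pvStep PySem.Dict.empty).contains ("income_statement", "revenue", (0 : Int)) = pvIn data "revenue" :=
  pvCandContains data "revenue" _ (by decide) (by decide)

lemma pvCC_1 (data : List (String × Option Int)) :
    (data.foldl pvStep PySem.Dict.empty).contains ("income_statement", "revenue", (1 : Int)) = pvIn data "totalRevenue" :=
  pvCandContains data "totalRevenue" _ (by decide) (by decide)

lemma pvCC_2 (data : List (String × Option Int)) :
    (data.foldl pvStep PySem.Dict.empty).contains ("income_statement", "revenue", (2 : Int)) = pvIn data "Revenue" :=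
  pvCandContains data "Revenue" _ (by decide) (by decide)

lemma pvCC_3 (data : List (String × Option Int)) :
    (data.foldl pvStep PySem.Dict.empty).contains ("balance_sheet", "total_assets", (0 : Int)) = pvIn data "total_assets" :=
  pvCandContains data "total_assets" _ (by decide) (by decide)

lemma pvCC_4 (data : List (String × Option Int)) :
    (data.foldl pvStep PySem.Dict.empty).contains ("balance_sheet", "total_assets", (1 : Int)) = pvIn data "totalAssets" :=
  pvCandContains data "totalAssets" _ (by decide) (by decide)

lemma pvCC_5 (data : List (String × Option Int)) :
    (data.foldl pvStep PySem.Dict.empty).contains ("balance_sheet", "total_assets", (2 : Int)) = pvIn data "Total Assets" :=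
  pvCandContains data "Total Assets" _ (by decide) (by decide)

-- ===== VERDICT (by name: the statement is the Claim_ definition above) =====
theorem extract_financial_statements_py_spec : Claim_equal_extract_financial_statements_py := by
  intro data _
  unfold Spec_extract_financial_statements_py
  simp only [extract_financial_statements_py, extract_financial_statements_py_alt, pvLayout,
    List.foldl_cons, List.foldl_nil, List.headD, pvRange3, pvRange5, List.any_cons, List.any_nil,
    pvScan_three, pvScan_five, pvCG_0, pvCG_1, pvCG_2, pvCG_3, pvCG_4, pvCG_5, pvCG_6, pvCG_7, pvCG_8, pvCG_9, pvCG_10, pvCG_11, pvCG_12, pvCG_13, pvCG_14, pvCG_15, pvCG_16, pvCG_17, pvCG_18, pvCG_19, pvCG_20, pvCG_21, pvCG_22, pvCG_23, pvCG_24, pvCG_25, pvCG_26, pvCG_27, pvCG_28, pvCG_29, pvCG_30, pvCG_31, pvCG_32, pvCG_33, pvCG_34, pvCC_0, pvCC_1, pvCC_2, pvCC_3, pvCC_4, pvCC_5]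
  split_ifs <;> simp
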